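-- pv_equiv track=rewrite | github.com/Grffiin/AdventOfCode | 2021/Day 1/Day 1.py | check_greater
-- ===== SOURCE A (Python) =====
-- def check_greater(list, i, last, len):
--     if i == len:
--         return 0
--
--     cur = int(list[i])
--     if cur > last:
--         return 1 + check_greater(list, i + 1, cur, len)
--     else:
--         return check_greater(list, i + 1, cur, len)
-- ===== SOURCE B (Python) =====
-- def check_greater(list, i, last, len):
--     count = 0
--     while i != len:
--         cur = int(list[i])
--         if cur > last:
--             count += 1
--         last = cur
--         i += 1
--     return count
-- ===== Notes on version B (the rewrite author's own statement) =====
-- stated objective: simpler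
-- what changed: Replaced the accumulating recursion by an iterative while-loop that maintains count and last explicitly (no recursion, no call stack).
import Mathlib
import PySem

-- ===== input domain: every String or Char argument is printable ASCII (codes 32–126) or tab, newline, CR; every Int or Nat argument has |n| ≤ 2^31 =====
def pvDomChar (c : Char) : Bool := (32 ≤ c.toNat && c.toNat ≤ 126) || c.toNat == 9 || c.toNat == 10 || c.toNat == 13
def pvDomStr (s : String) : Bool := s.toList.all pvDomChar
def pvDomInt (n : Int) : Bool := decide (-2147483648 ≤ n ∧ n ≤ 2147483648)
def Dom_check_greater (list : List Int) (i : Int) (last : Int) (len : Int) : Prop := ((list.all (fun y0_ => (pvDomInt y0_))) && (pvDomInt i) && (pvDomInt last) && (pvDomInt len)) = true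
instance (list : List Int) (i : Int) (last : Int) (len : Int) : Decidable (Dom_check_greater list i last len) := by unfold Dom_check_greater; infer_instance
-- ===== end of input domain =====

-- B replaces A's accumulating recursion by an iterative loop with explicit count/last state (simpler; equal return values on Pre_).

-- ===== PORT A =====
-- Literal port of A's recursion. The 'else if i < len' guard only makes the
-- recursion total in Lean: Python diverges/raises for i beyond len (outside Pre_).
def check_greater (list : List Int) (i : Int) (last : Int) (len : Int) : Int :=
  if i = len then 0
  else if _h : i < len then
    let cur := (PySem.List.pyGet? list i).getD 0   -- list[i]; none = IndexError, outside Pre_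
    if cur > last then 1 + check_greater list (i + 1) cur len
    else check_greater list (i + 1) cur len
  else 0
termination_by (len - i).toNat
decreasing_by all_goals omega

-- ===== PORT B =====
-- while i != len: …  — tail-recursive loop state (i, last, count); same totality guard.
def check_greater_loop (list : List Int) (i : Int) (last : Int) (len : Int) (count : Int) : Int :=
  if i = len then count
  else if _h : i < len then
    let cur := (PySem.List.pyGet? list i).getD 0
    check_greater_loop list (i + 1) cur len (if cur > last then count + 1 else count)
  else count
termination_by (len - i).toNat
decreasing_by all_goals omega

def check_greater_alt (list : List Int) (i : Int) (last : Int) (len : Int) : Int :=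
  check_greater_loop list i last len 0

-- ===== PRECONDITION & SPEC =====
-- Exactly the inputs on which Python A returns: either i = len (returns 0 at once),
-- or i < len with every index i..len-1 valid under Python's negative-index rule.
def Pre_check_greater (list : List Int) (i : Int) (last : Int) (len : Int) : Prop :=
  i = len ∨ (i < len ∧ -(list.length : Int) ≤ i ∧ len ≤ (list.length : Int))
instance (list : List Int) (i : Int) (last : Int) (len : Int) : Decidable (Pre_check_greater list i last len) := by unfold Pre_check_greater; infer_instance

def pvWitness_check_greater : List Int × Int × Int × Int := ([1, 2, 1, 3], 0, 0, 4)

def Spec_check_greater (list : List Int) (i : Int) (last : Int) (len : Int) (out : Int) : Prop := out = check_greater_alt list i last len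
instance (list : List Int) (i : Int) (last : Int) (len : Int) (out : Int) : Decidable (Spec_check_greater list i last len out) := by unfold Spec_check_greater; infer_instance

-- ===== CLAIM (what is proved, stated in full; the proofs are below) =====
def Claim_equal_check_greater : Prop := ∀ (list : List Int) (i : Int) (last : Int) (len : Int), Dom_check_greater list i last len → Pre_check_greater list i last len → Spec_check_greater list i last len (check_greater list i last len)

-- ===== LEMMAS AND PROOFS =====

-- Loop invariant: the accumulator adds on top of A's recursive count.
theorem loop_eq (n : Nat) : ∀ (list : List Int) (i last len count : Int),
    (len - i).toNat ≤ n →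
    check_greater_loop list i last len count = check_greater list i last len + count := by
  induction n with
  | zero =>
    intro list i last len count h
    unfold check_greater_loop check_greater
    split
    · omega
    · split
      · omega
      · omega
  | succ m ih =>
    intro list i last len count h
    unfold check_greater_loop check_greater
    split
    · omega
    · split
      · rename_i hne hlt
        have hrec := ih list (i + 1) ((PySem.List.pyGet? list i).getD 0) len
        simp only at hrec ⊢
        rw [hrec _ (by omega)]
        split <;> omega
      · omega

-- ===== VERDICT (by name: the statement is the Claim_ definition above) =====
theorem check_greater_spec : Claim_equal_check_greater := by
  intro list i last len _ _
  unfold Spec_check_greater check_greater_alt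
  rw [loop_eq (len - i).toNat list i last len 0 le_rfl]
  omega
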